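-- pv_equiv track=rewrite | github.com/zqlai/zqlai.github.io | markdown_generator/generate_publications_page.py | parse_quoted_value
-- ===== SOURCE A (Python) =====
-- def parse_quoted_value(text: str, start: int) -> tuple[str, int]:
--     chars = []
--     escaped = False
--
--     for index in range(start + 1, len(text)):
--         char = text[index]
--         if escaped:
--             chars.append(char)
--             escaped = False
--             continue
--         if char == "\\":
--             escaped = True
--             chars.append(char)
--             continue
--         if char == '"':
--             return "".join(chars), index + 1
--         chars.append(char)
--
--     raise ValueError("Unbalanced quotes in BibTeX value.")
-- ===== SOURCE B (Python) =====
-- def parse_quoted_value(text: str, start: int) -> tuple[str, int]: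
--     # find-based skip scanning: jump from quote to quote with str.find and decide
--     # by backslash-run parity; the value is a single slice text[start+1:q].
--     pos = start + 1
--     while True:
--         q = text.find('"', pos)
--         if q == -1:
--             raise ValueError("Unbalanced quotes in BibTeX value.")
--         bs = 0
--         while q - 1 - bs >= start + 1 and text[q - 1 - bs] == "\\":
--             bs += 1
--         if bs % 2 == 0:
--             return text[start + 1:q], q + 1
--         pos = q + 1
-- ===== Notes on version B (the rewrite author's own statement) =====
-- stated objective: alternative
-- what changed: Replaces A's char-by-char escape-flag state machine that accumulates kept characters in a list with find-based skip scanning: jump to each quote with str.find, decide escapedness by the parity of the backslash run immediately before it, and return a single slice text[start+1:q]; Pre_ additionally excludes negative start (start+1 < 0), on which A returns via Python's negative-index wraparound reads while B's find clamps the position — an unspecified corner where both behaviours are accidental.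
-- outside the precondition, e.g. on parse_quoted_value('a"b', -4): A returns ('a', -1), B returns ('a', 2)
import Mathlib
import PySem

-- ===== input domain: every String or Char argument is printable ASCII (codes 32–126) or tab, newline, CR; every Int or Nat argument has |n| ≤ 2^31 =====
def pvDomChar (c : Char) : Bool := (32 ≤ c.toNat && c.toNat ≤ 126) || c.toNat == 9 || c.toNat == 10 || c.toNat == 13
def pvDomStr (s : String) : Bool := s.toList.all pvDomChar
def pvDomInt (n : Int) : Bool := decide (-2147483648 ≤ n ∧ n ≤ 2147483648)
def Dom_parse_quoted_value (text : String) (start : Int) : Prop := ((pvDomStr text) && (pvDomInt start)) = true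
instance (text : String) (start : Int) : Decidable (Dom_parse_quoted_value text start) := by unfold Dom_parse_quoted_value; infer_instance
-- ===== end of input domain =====

-- B replaces A's char-by-char escape-flag state machine with find-based skip scanning
-- (jump to each quote, backslash-run parity check, one final slice) — alternative, same O(n) cost.

-- ===== PORT A =====
-- loop of A: state = (chars, escaped); fuel = number of remaining indices of range(start+1, len(text));
-- none = the Python raises (IndexError on an out-of-range read, ValueError when the loop ends).
def pvGoA (L : List Char) : Nat → List Char → Bool → Int → Option (String × Int)
  | 0, _, _, _ => none
  | fuel+1, chars, escaped, index =>
    match PySem.List.pyGet? L index with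
    | none => none
    | some c =>
      if escaped then pvGoA L fuel (chars ++ [c]) false (index+1)
      else if c = '\\' then pvGoA L fuel (chars ++ [c]) true (index+1)
      else if c = '"' then some (String.ofList chars, index + 1)
      else pvGoA L fuel (chars ++ [c]) false (index+1)

def parse_quoted_value (text : String) (start : Int) : String × Int :=
  (pvGoA text.toList ((text.toList.length : Int) - (start+1)).toNat [] false (start+1)).getD ("", 0)

-- ===== PORT B =====
-- inner while of B: bs += 1 while q-1-bs >= start+1 and text[q-1-bs] == '\\';
-- none = the read text[q-1-bs] would be a Python IndexError; fuel bounds the count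
-- (q - (start+1) + 1 steps suffice, the bound check fails at bs = q-1-(start+1)+1).
def pvCountBS (L : List Char) (start : Int) : Nat → Int → Nat → Option Nat
  | 0, _, bs => some bs
  | fuel+1, q, bs =>
    if start + 1 ≤ q - 1 - (bs : Int) then
      match PySem.List.pyGet? L (q - 1 - (bs : Int)) with
      | none => none
      | some c => if c = '\\' then pvCountBS L start fuel q (bs+1) else some bs
    else some bs

-- outer while of B: q = text.find('"', pos); -1 → ValueError (none); even backslash run →
-- return (text[start+1:q], q+1); else pos = q+1.  Each found q is a strictly increasing
-- index < len(text), so len(text)+1 find calls suffice as fuel.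
def pvGoB (L : List Char) (start : Int) : Nat → Int → Option (String × Int)
  | 0, _ => none
  | fuel+1, pos =>
    let q := PySem.Chars.findFrom L ['"'] pos none
    if q = -1 then none
    else
      match pvCountBS L start ((q - (start+1)).toNat + 1) q 0 with
      | none => none
      | some bs =>
        if bs % 2 = 0 then
          some (String.ofList (PySem.List.slice L (some (start+1)) (some q)), q + 1)
        else pvGoB L start fuel (q+1)

def parse_quoted_value_alt (text : String) (start : Int) : String × Int :=
  (pvGoB text.toList start (text.toList.length + 1) (start+1)).getD ("", 0)

-- ===== PRECONDITION & SPEC =====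
-- Pre_: exactly the inputs on which A returns, except that negative start (start+1 < 0) is
-- excluded: there A returns only via Python's negative-index wraparound reads while B's find
-- clamps the position — an unspecified corner where both behaviours are accidental.
-- Otherwise: some in-range quote is preceded by an even maximal run of backslashes
-- (no such quote = A's ValueError "Unbalanced quotes in BibTeX value.").
def Pre_parse_quoted_value (text : String) (start : Int) : Prop :=
  0 ≤ start + 1 ∧
  ∃ d : Nat, d < ((text.toList.length : Int) - (start + 1)).toNat ∧
    PySem.List.pyGet? text.toList (start + 1 + d) = some '"' ∧
    ∃ e : Nat, e ≤ d ∧ (d - e) % 2 = 0 ∧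
      (∀ m : Nat, m < d → e ≤ m → PySem.List.pyGet? text.toList (start + 1 + m) = some '\\') ∧
      (e = 0 ∨ PySem.List.pyGet? text.toList (start + 1 + (e : Int) - 1) ≠ some '\\')
instance (text : String) (start : Int) : Decidable (Pre_parse_quoted_value text start) := by
  unfold Pre_parse_quoted_value; infer_instance

def pvWitness_parse_quoted_value : String × Int := ("\"ab\"", 0)

def Spec_parse_quoted_value (text : String) (start : Int) (out : String × Int) : Prop := out = parse_quoted_value_alt text start
instance (text : String) (start : Int) (out : String × Int) : Decidable (Spec_parse_quoted_value text start out) := by unfold Spec_parse_quoted_value; infer_instance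

-- ===== CLAIM (what is proved, stated in full; the proofs are below) =====
def Claim_equal_parse_quoted_value : Prop := ∀ (text : String) (start : Int), Dom_parse_quoted_value text start → Pre_parse_quoted_value text start → Spec_parse_quoted_value text start (parse_quoted_value text start)

-- ===== LEMMAS AND PROOFS =====

-- length of the maximal '\\'-run at the head of a (reversed) list
def pvRun : List Char → Nat
  | [] => 0
  | c :: rest => if c = '\\' then pvRun rest + 1 else 0

-- A's escaped flag folded over a segment
def pvEscStep (e : Bool) (c : Char) : Bool := if e then false else decide (c = '\\')

lemma pvRun_le_length (l : List Char) : pvRun l ≤ l.length := by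
  induction l with
  | nil => simp [pvRun]
  | cons c rest ih =>
    by_cases h : c = '\\'
    · simp [pvRun, h]; omega
    · simp [pvRun, h]

lemma pvRun_lt (l : List Char) (i : Nat) (h : i < pvRun l) : l[i]? = some '\\' := by
  induction l generalizing i with
  | nil => simp [pvRun] at h
  | cons c rest ih =>
    by_cases hc : c = '\\'
    · cases i with
      | zero => simp [hc]
      | succ j => simp [pvRun, hc] at h; simpa using ih j (by omega)
    · simp [pvRun, hc] at h

lemma pvRun_stop (l : List Char) (h : pvRun l < l.length) :
    ∃ c, l[pvRun l]? = some c ∧ c ≠ '\\' := by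
  induction l with
  | nil => simp at h
  | cons c rest ih =>
    by_cases hc : c = '\\'
    · simp only [pvRun, hc, if_pos] at h ⊢
      obtain ⟨c', hc', hne⟩ := ih (by simpa using h)
      exact ⟨c', by simpa using hc', hne⟩
    · exact ⟨c, by simp [pvRun, hc], hc⟩

-- A's escaped flag over a quote-free segment = parity of the trailing backslash run
lemma pvEsc_parity (seg : List Char) :
    seg.foldl pvEscStep false = decide (pvRun seg.reverse % 2 = 1) := by
  induction seg using List.reverseRecOn with
  | nil => simp [pvRun]
  | append_singleton seg c ih =>
    rw [List.foldl_append, List.foldl_cons, List.foldl_nil, ih,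
        show (seg ++ [c]).reverse = c :: seg.reverse from by simp]
    by_cases hc : c = '\\'
    · subst hc
      rw [show pvRun ('\\' :: seg.reverse) = pvRun seg.reverse + 1 from by simp [pvRun]]
      by_cases hp : pvRun seg.reverse % 2 = 1 <;> simp [pvEscStep, hp] <;> omega
    · rw [show pvRun (c :: seg.reverse) = 0 from by simp [pvRun, hc]]
      simp [pvEscStep, hc]

-- A appended over a quote-free stretch of k characters
lemma pvScanA (L : List Char) (k : Nat) :
    ∀ (p : Nat) (chars : List Char) (esc : Bool), p + k ≤ L.length →
      (∀ m : Nat, p ≤ m → m < p + k → L[m]? ≠ some '"') →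
      pvGoA L (L.length - p) chars esc (p : Int) =
      pvGoA L (L.length - (p + k)) (chars ++ (L.drop p).take k)
        (((L.drop p).take k).foldl pvEscStep esc) ((p + k : Nat) : Int) := by
  induction k with
  | zero => intro p chars esc _ _; simp
  | succ k ih =>
    intro p chars esc hlen hq
    have hp : p < L.length := by omega
    have hfuel : L.length - p = (L.length - (p + 1)) + 1 := by omega
    have hdrop : L.drop p = L[p] :: L.drop (p + 1) := List.drop_eq_getElem_cons hp
    have hget : PySem.List.pyGet? L (p : Int) = some L[p] := by
      simp [PySem.List.pyGet?_natCast, List.getElem?_eq_getElem hp]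
    have hnq : L[p] ≠ '"' := by
      intro h; exact hq p le_rfl (by omega) (by simp [List.getElem?_eq_getElem hp, h])
    have hseg : (L.drop p).take (k + 1) = L[p] :: (L.drop (p + 1)).take k := by
      rw [hdrop]; rfl
    have hcast : (p : Int) + 1 = ((p + 1 : Nat) : Int) := by push_cast; ring
    have htail := ih (p + 1) (chars ++ [L[p]]) (pvEscStep esc L[p]) (by omega)
      (fun m h1 h2 => hq m (by omega) (by omega))
    rw [show p + 1 + k = p + (k + 1) from by omega,
        show chars ++ [L[p]] ++ (L.drop (p+1)).take k = chars ++ (L[p] :: (L.drop (p+1)).take k) from by simp] at htail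
    have hstep : pvGoA L ((L.length - (p + 1)) + 1) chars esc (p : Int)
        = pvGoA L (L.length - (p + 1)) (chars ++ [L[p]]) (pvEscStep esc L[p]) ((p : Int) + 1) := by
      cases esc with
      | true => simp [pvGoA, hget, pvEscStep]
      | false =>
        by_cases hbs : L[p] = '\\' <;> simp [pvGoA, hget, pvEscStep, hbs, hnq]
    rw [hfuel, hstep, hcast, htail, hseg, List.foldl_cons]

-- B's inner while loop computes the trailing backslash-run length of L[p:q]
lemma pvCountBS_eq (L : List Char) (start : Int) (a p q : Nat)
    (ha : (a : Int) = start + 1) (hap : a ≤ p) (hpq : p ≤ q) (hqn : q ≤ L.length)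
    (hbar : p = a ∨ (0 < p ∧ L[p - 1]? = some '"')) :
    ∀ (t fuel : Nat), t ≤ pvRun ((L.drop p).take (q - p)).reverse →
      pvRun ((L.drop p).take (q - p)).reverse - t < fuel →
      pvCountBS L start fuel (q : Int) t = some (pvRun ((L.drop p).take (q - p)).reverse) := by
  intro t fuel
  set seg := (L.drop p).take (q - p) with hseg
  have hseglen : seg.length = q - p := by
    simp [hseg, List.length_take, List.length_drop]; omega
  set r := pvRun seg.reverse with hr
  have hrlen : r ≤ q - p := by
    have := pvRun_le_length seg.reverse
    simpa [hseglen] using this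
  -- characters inside the run
  have hrun : ∀ u : Nat, u < r → L[q - 1 - u]? = some '\\' := by
    intro u hu
    have h1 : seg.reverse[u]? = some '\\' := pvRun_lt _ u hu
    have hu' : u < seg.length := by omega
    rw [List.getElem?_reverse (by simpa [List.length_reverse] using hu')] at h1
    rw [hseglen] at h1
    rw [hseg, List.getElem?_take_of_lt (by omega), List.getElem?_drop] at h1
    have : p + (q - p - 1 - u) = q - 1 - u := by omega
    rwa [this] at h1
  induction fuel generalizing t with
  | zero => omega
  | succ fuel ih =>
    intro ht hfuel
    by_cases hstop : t = r
    · -- the loop stops here: bound fails or a non-backslash character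
      simp only [pvCountBS]
      by_cases hb : start + 1 ≤ (q : Int) - 1 - (t : Int)
      · rw [if_pos hb]
        -- the index is in range and holds a non-backslash
        have hidx : (q : Int) - 1 - (t : Int) = ((q - 1 - t : Nat) : Int) := by
          have : (a : Int) ≤ (q : Int) - 1 - (t : Int) := by omega
          omega
        rw [hidx, PySem.List.pyGet?_natCast]
        have hq1t : a ≤ q - 1 - t := by
          have : (a : Int) ≤ (q : Int) - 1 - (t : Int) := by omega
          omega
        have hqpos : 1 + t ≤ q := by
          have : (0 : Int) ≤ (q : Int) - 1 - (t : Int) := by omega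
          omega
        by_cases hcase : t < q - p
        · -- stop inside the segment: the character before the run is not '\\'
          obtain ⟨c, hc, hcne⟩ := pvRun_stop seg.reverse (by rw [← hr]; simp only [List.length_reverse, hseglen]; omega)
          rw [← hr] at hc
          rw [List.getElem?_reverse (by simp [hseglen]; omega), hseglen] at hc
          rw [hseg, List.getElem?_take_of_lt (by omega), List.getElem?_drop] at hc
          have : p + (q - p - 1 - r) = q - 1 - t := by omega
          rw [this] at hc
          rw [hc]
          simp only [if_neg hcne, hstop]
        · -- t = r = q - p: stopped at index p - 1, which the barrier says is '"' (or out of bound)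
          have htqp : t = q - p := by omega
          have hp0 : p = a ∨ (0 < p ∧ L[p - 1]? = some '"') := hbar
          rcases hp0 with hpa | ⟨hppos, hquote⟩
          · -- p = a: then q - 1 - t = a - 1 < a contradicts hb
            exfalso
            have : q - 1 - t + 1 = p := by omega
            have : (q : Int) - 1 - (t : Int) = (a : Int) - 1 := by
              subst hpa; omega
            omega
          · have : q - 1 - t = p - 1 := by omega
            rw [this, hquote]
            simp only [if_neg (show ¬ ('"' = '\\') from by decide), hstop]
      · rw [if_neg hb, hstop]
    · -- t < r: the character is a backslash, continue
      have htr : t < r := by omega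
      simp only [pvCountBS]
      have hq1t : a ≤ q - 1 - t ∧ 1 + t ≤ q := by
        have h1 : t < q - p := by omega
        omega
      have hb : start + 1 ≤ (q : Int) - 1 - (t : Int) := by
        rw [← ha]; omega
      rw [if_pos hb]
      have hidx : (q : Int) - 1 - (t : Int) = ((q - 1 - t : Nat) : Int) := by omega
      rw [hidx, PySem.List.pyGet?_natCast, hrun t htr]
      simp only []
      exact ih (t + 1) (by omega) (by omega)

-- main loop correspondence: A scanning from p with escaped=false and chars = L[a:p]
-- equals B's find loop at pos = p, provided p is a barrier position
lemma pvMain (L : List Char) (start : Int) (a : Nat) (ha : (a : Int) = start + 1) :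
    ∀ (fuelB : Nat) (p : Nat) (chars : List Char), a ≤ p → p ≤ L.length →
      (p = a ∨ (0 < p ∧ L[p - 1]? = some '"')) →
      L.length - p < fuelB →
      chars = (L.drop a).take (p - a) →
      pvGoA L (L.length - p) chars false (p : Int) = pvGoB L start fuelB (p : Int) := by
  intro fuelB
  induction fuelB with
  | zero => intro p chars _ _ _ h _; omega
  | succ fuelB ih =>
    intro p chars hap hpn hbar hfuel hchars
    simp only [pvGoB]
    rw [PySem.Chars.findFrom_natCast L ['"'] p hpn]
    by_cases hfind : PySem.Chars.find (L.drop p) ['"'] = -1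
    · -- no quote ahead: A scans to the end and both are none
      rw [if_pos (by rw [hfind]; rfl)]
      have hnoq : ∀ m : Nat, p ≤ m → m < L.length → L[m]? ≠ some '"' := by
        intro m h1 h2 hm
        rw [PySem.Chars.find_eq_neg_one_iff] at hfind
        apply hfind
        rw [List.singleton_infix_iff]
        have : (L.drop p)[m - p]? = some '"' := by
          rw [List.getElem?_drop, show p + (m - p) = m from by omega]; exact hm
        exact List.mem_of_getElem? this
      rw [pvScanA L (L.length - p) p chars false (by omega)
        (fun m h1 h2 => hnoq m h1 (by omega))]
      have : L.length - (p + (L.length - p)) = 0 := by omega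
      rw [this]; rfl
    · -- a quote at q = p + j
      have hfnn : 0 ≤ PySem.Chars.find (L.drop p) ['"'] := by
        have h1 := PySem.Chars.neg_one_le_find (L.drop p) ['"']
        omega
      set j := (PySem.Chars.find (L.drop p) ['"']).toNat with hj
      have hjle : (j : Int) = PySem.Chars.find (L.drop p) ['"'] := Int.toNat_of_nonneg hfnn
      obtain ⟨hpre, hmin⟩ := PySem.Chars.find_spec hfnn
      set q := p + j with hq
      have hquote : L[q]? = some '"' := by
        rcases hpre with ⟨t, ht⟩
        have : ((L.drop p).drop j) = '"' :: t := by simpa using ht.symm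
        have h2 : (L.drop p)[j]? = some '"' := by
          rw [show (L.drop p)[j]? = ((L.drop p).drop j)[0]? by
                rw [List.getElem?_drop]; norm_num, this]
          rfl
        rw [List.getElem?_drop] at h2; exact h2
      have hqlt : q < L.length := by
        rcases List.getElem?_eq_some_iff.mp hquote with ⟨h, -⟩
        exact h
      have hnoq : ∀ m : Nat, p ≤ m → m < q → L[m]? ≠ some '"' := by
        intro m h1 h2 hm
        have : ¬ ['"'] <+: (L.drop p).drop (m - p) := hmin (m - p) (by omega)
        apply this
        have : (L.drop p).drop (m - p) = L.drop m := by
          rw [List.drop_drop]; congr 1; omega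
        rw [this]
        rw [List.drop_eq_getElem_cons (by omega : m < L.length)]
        have : L[m] = '"' := by
          have hsome : L[m]? = some (L[m]'(by omega)) := List.getElem?_eq_getElem (by omega)
          rw [hsome] at hm; exact Option.some.inj hm
        rw [this]
        exact List.prefix_cons_inj _ |>.mpr (List.nil_prefix)
      have hfind' : (if PySem.Chars.find (L.drop p) ['"'] = -1 then (-1 : Int)
          else (p : Int) + PySem.Chars.find (L.drop p) ['"']) = ((q : Nat) : Int) := by
        rw [if_neg hfind, ← hjle]; omega
      rw [hfind']
      rw [if_neg (by omega : ¬ ((q : Nat) : Int) = -1)]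
      -- A scans the quote-free stretch of j characters
      set seg := (L.drop p).take j with hseg
      have hsegtake : (L.drop p).take (q - p) = seg := by rw [hseg]; congr 1; omega
      have hscan := pvScanA L j p chars false (by omega) (fun m h1 h2 => hnoq m h1 (by omega))
      rw [hscan]
      set r := pvRun seg.reverse with hr
      have hesc : seg.foldl pvEscStep false = decide (r % 2 = 1) := pvEsc_parity seg
      -- B's inner count
      have hrle : r ≤ j := by
        have h1 := pvRun_le_length seg.reverse
        have h2 : seg.length ≤ j := by simp [hseg]
        simp [List.length_reverse] at h1; omega
      have hcount := pvCountBS_eq L start a p q ha hap (by omega) (by omega) hbar 0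
        (((q : Int) - (start + 1)).toNat + 1) (by omega)
        (by rw [hsegtake, ← hr, ← ha]
            have : ((q : Int) - (a : Int)).toNat = q - a := by rw [← Int.natCast_sub (by omega)]; simp
            omega)
      rw [hsegtake, ← hr] at hcount
      simp only [hcount]
      -- the chars A accumulated over [a, q)
      have hcharsq : chars ++ seg = (L.drop a).take (q - a) := by
        rw [hchars, hseg]
        have h1 : q - a = (p - a) + j := by omega
        rw [h1, List.take_add]
        congr 1
        rw [List.drop_drop]
        congr 2
        omega
      by_cases hpar : r % 2 = 0
      · -- even run: the quote closes; A returns at index q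
        rw [if_pos hpar]
        have hescf : seg.foldl pvEscStep false = false := by
          rw [hesc]; simp; omega
        rw [hescf]
        have hfq : L.length - (p + j) = (L.length - (p + j) - 1) + 1 := by omega
        rw [hfq]
        simp only [pvGoA]
        have hgetq : PySem.List.pyGet? L ((q : Nat) : Int) = some '"' := by
          simp [PySem.List.pyGet?_natCast, hquote]
        rw [hgetq]
        simp only [Bool.false_eq_true, if_neg (not_false), if_neg (by decide : ('"' : Char) ≠ '\\')]
        rw [hcharsq]
        rw [← ha, PySem.List.slice_natCast]
        rfl
      · -- odd run: the quote is escaped; A consumes it and both continue at q+1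
        rw [if_neg hpar]
        have hescf : seg.foldl pvEscStep false = true := by
          rw [hesc]; simp; omega
        rw [hescf]
        have hfq : L.length - (p + j) = (L.length - (q + 1)) + 1 := by omega
        rw [hfq]
        simp only [pvGoA]
        have hgetq : PySem.List.pyGet? L ((q : Nat) : Int) = some '"' := by
          simp [PySem.List.pyGet?_natCast, hquote]
        rw [hgetq]
        simp only [if_pos]
        have hcast1 : ((q : Nat) : Int) + 1 = ((q + 1 : Nat) : Int) := by push_cast; ring
        rw [hcast1]
        apply ih (q + 1) (chars ++ seg ++ ['"']) (by omega) (by omega)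
          (Or.inr ⟨by omega, by simpa using hquote⟩) (by omega)
        rw [hcharsq, show q + 1 - a = (q - a) + 1 from by omega, List.take_add_one]
        congr 1
        rw [List.getElem?_drop, show a + (q - a) = q by omega, hquote]
        rfl

-- ===== VERDICT (by name: the statement is the Claim_ definition above) =====
theorem parse_quoted_value_spec : Claim_equal_parse_quoted_value := by
  intro text start _ hpre
  obtain ⟨h0, d, hd, -⟩ := hpre
  show parse_quoted_value text start = parse_quoted_value_alt text start
  set L := text.toList with hL
  set a : Nat := (start + 1).toNat with haN
  have ha : (a : Int) = start + 1 := Int.toNat_of_nonneg h0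
  have haln : a ≤ L.length := by
    have : 0 < ((L.length : Int) - (start + 1)).toNat := by omega
    omega
  unfold parse_quoted_value parse_quoted_value_alt
  rw [← hL, ← ha]
  have hfa : ((L.length : Int) - (a : Int)).toNat = L.length - a := Int.toNat_sub _ _
  rw [hfa]
  rw [pvMain L start a ha (L.length + 1) a [] le_rfl haln (Or.inl rfl) (by omega) (by simp)]
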